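-- pv_equiv track=rewrite | github.com/chopigomame/atcoder | typical/try-1/008.py | create_next
-- ===== SOURCE A (Python) =====
-- def create_next(N, S):
-- 	nex = [[N]*7 for _ in range(N+1)]
-- 	chars = list("atcoder")
-- 	for i in range(N-1, -1, -1):
-- 		for k in range(7):
-- 			nex[i][k] = nex[i+1][k]
-- 		for k, char in enumerate(chars):
-- 			if S[i] == char:
-- 				nex[i][k] = i
-- 				break
-- 	return nex
-- ===== SOURCE B (Python) =====
-- def create_next(N, S):
-- 	nex = [[N] * 7 for _ in range(N + 1)]
-- 	for k, char in enumerate("atcoder"):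
-- 		nxt = N
-- 		for i in range(N - 1, -1, -1):
-- 			if S[i] == char:
-- 				nxt = i
-- 			nex[i][k] = nxt
-- 	return nex
-- ===== Notes on version B (the rewrite author's own statement) =====
-- stated objective: alternative
-- what changed: B builds the table column by column (character-outer, descending-index-inner), carrying one running next-index scalar per character, instead of row by row with a 7-entry row copy and a break-scan over the characters at each index.
import Mathlib
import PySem

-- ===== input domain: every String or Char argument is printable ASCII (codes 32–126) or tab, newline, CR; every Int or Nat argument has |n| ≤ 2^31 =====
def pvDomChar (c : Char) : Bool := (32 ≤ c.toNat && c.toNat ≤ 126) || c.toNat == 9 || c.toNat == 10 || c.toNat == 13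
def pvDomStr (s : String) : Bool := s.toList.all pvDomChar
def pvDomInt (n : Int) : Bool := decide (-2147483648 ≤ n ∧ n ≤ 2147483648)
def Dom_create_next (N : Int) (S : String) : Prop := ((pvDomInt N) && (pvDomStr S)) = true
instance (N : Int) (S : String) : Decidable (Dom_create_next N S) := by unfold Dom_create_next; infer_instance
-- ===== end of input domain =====

-- B builds the table column by column with a running next-index scalar per character,
-- instead of A's row-by-row pass that copies the previous row and break-scans the characters.

-- ===== PORT A =====
-- inner 'for k, char in enumerate(chars): if S[i] == char: nex[i][k] = i; break'
def pvMatchLoop (i : Int) (sc : Option Char) (nex : List (List Int)) : List (Int × Char) → List (List Int)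
  | [] => nex
  | (k, c) :: rest =>
    if sc = some c then nex.modify i.toNat (fun row => row.set k.toNat i)
    else pvMatchLoop i sc nex rest

def create_next (N : Int) (S : String) : List (List Int) :=
  let nex := (PySem.List.pyRange 0 (N + 1) 1).map (fun _ => List.replicate 7 N)
  let chars := "atcoder".toList
  (PySem.List.pyRange (N - 1) (-1) (-1)).foldl (fun nx i =>
    let nx2 := (List.range 7).foldl (fun nx2 k =>
      nx2.modify i.toNat (fun row => row.set k ((PySem.List.pyGetD nx2 (i + 1) []).getD k 0))) nx
    pvMatchLoop i (PySem.Str.pyGet? S i) nx2 (PySem.List.enumerate chars)) nex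

-- ===== PORT B =====
def create_next_alt (N : Int) (S : String) : List (List Int) :=
  let nex := (PySem.List.pyRange 0 (N + 1) 1).map (fun _ => List.replicate 7 N)
  (PySem.List.enumerate "atcoder".toList).foldl (fun nx kc =>
    ((PySem.List.pyRange (N - 1) (-1) (-1)).foldl (fun (p : List (List Int) × Int) i =>
      let nxt := if PySem.Str.pyGet? S i = some kc.2 then i else p.2
      (p.1.modify i.toNat (fun row => row.set kc.1.toNat nxt), nxt)) (nx, N)).1) nex

-- ===== PRECONDITION & SPEC =====
-- Pre_ excludes exactly the inputs on which A raises IndexError (reading S[i] with N > len(S)).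
def Pre_create_next (N : Int) (S : String) : Prop := N ≤ (S.toList.length : Int)
instance (N : Int) (S : String) : Decidable (Pre_create_next N S) := by unfold Pre_create_next; infer_instance
def pvWitness_create_next : Int × String := (3, "tac")

def Spec_create_next (N : Int) (S : String) (out : List (List Int)) : Prop := out = create_next_alt N S
instance (N : Int) (S : String) (out : List (List Int)) : Decidable (Spec_create_next N S out) := by unfold Spec_create_next; infer_instance

-- ===== CLAIM (what is proved, stated in full; the proofs are below) =====
def Claim_equal_create_next : Prop := ∀ (N : Int) (S : String), Dom_create_next N S → Pre_create_next N S → Spec_create_next N S (create_next N S)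

-- ===== LEMMAS AND PROOFS =====

def pvChars : List Char := ['a', 't', 'c', 'o', 'd', 'e', 'r']

theorem pvChars_eq : "atcoder".toList = pvChars := by decide

-- next occurrence of c in S at an index ≥ i (looking only below n); N if none
def pvT (L : List Char) (N : Int) (n : Nat) (c : Char) (i : Nat) : Int :=
  match PySem.List.index? ((L.take n).drop i) c with
  | some d => (i : Int) + d
  | none => N

def pvRow (L : List Char) (N : Int) (n i : Nat) : List Int :=
  pvChars.map (fun c => pvT L N n c i)

-- the loop bodies of the two ports, named so the fold lemmas can speak about them
def pvBodyA (S : String) (nx : List (List Int)) (q : Int) : List (List Int) :=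
  let nx2 := (List.range 7).foldl (fun nx2 k =>
    nx2.modify q.toNat (fun row => row.set k ((PySem.List.pyGetD nx2 (q + 1) []).getD k 0))) nx
  pvMatchLoop q (PySem.Str.pyGet? S q) nx2 (PySem.List.enumerate "atcoder".toList)

def pvStepB (S : String) (kc : Int × Char) (p : List (List Int) × Int) (q : Int) : List (List Int) × Int :=
  let nxt := if PySem.Str.pyGet? S q = some kc.2 then q else p.2
  (p.1.modify q.toNat (fun row => row.set kc.1.toNat nxt), nxt)

def pvColB (S : String) (N : Int) (nx : List (List Int)) (kc : Int × Char) : List (List Int) :=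
  ((PySem.List.pyRange (N - 1) (-1) (-1)).foldl (pvStepB S kc) (nx, N)).1

theorem pvA_eq (N : Int) (S : String) :
    create_next N S
      = (PySem.List.pyRange (N - 1) (-1) (-1)).foldl (pvBodyA S)
          ((PySem.List.pyRange 0 (N + 1) 1).map (fun _ => List.replicate 7 N)) := rfl

theorem pvB_eq (N : Int) (S : String) :
    create_next_alt N S
      = (PySem.List.enumerate "atcoder".toList).foldl (pvColB S N)
          ((PySem.List.pyRange 0 (N + 1) 1).map (fun _ => List.replicate 7 N)) := rfl

theorem pvT_top (L : List Char) (N : Int) (n : Nat) (c : Char) :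
    pvT L N n c n = N := by
  unfold pvT
  rw [List.drop_eq_nil_of_le (by simp)]
  rfl

theorem pvT_eq (L : List Char) (N : Int) (n : Nat) (c : Char) (i : Nat)
    (hi : i < n) (hL : L[i]? = some c) : pvT L N n c i = i := by
  obtain ⟨hlt, hv⟩ := List.getElem?_eq_some_iff.mp hL
  unfold pvT
  rw [List.drop_eq_getElem_cons (by simp; omega)]
  simp only [List.getElem_take, hv, PySem.List.index?_cons_self]
  simp

theorem pvT_ne (L : List Char) (N : Int) (n : Nat) (c ch : Char) (i : Nat)
    (hi : i < n) (hL : L[i]? = some ch) (hne : ch ≠ c) :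
    pvT L N n c i = pvT L N n c (i + 1) := by
  obtain ⟨hlt, hv⟩ := List.getElem?_eq_some_iff.mp hL
  unfold pvT
  rw [List.drop_eq_getElem_cons (by simp; omega)]
  rw [PySem.List.index?_cons_of_ne _ (by simp only [List.getElem_take, hv]; exact hne)]
  cases hidx : PySem.List.index? ((L.take n).drop (i + 1)) c <;> simp [hidx] <;> push_cast <;> ring

theorem pvRow_len (L : List Char) (N : Int) (n i : Nat) : (pvRow L N n i).length = 7 := by
  simp [pvRow, pvChars]

theorem pvRow_top (L : List Char) (N : Int) (n : Nat) :
    pvRow L N n n = List.replicate 7 N := by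
  simp [pvRow, pvT_top, pvChars, List.replicate]

-- generic list-surgery helpers
theorem pv_modify_id {α : Type} (l : List α) (i : Nat) : l.modify i (fun x => x) = l := by
  apply List.ext_getElem
  · simp
  · intro j h1 h2
    simp only [List.getElem_modify]
    split <;> rfl

theorem pv_modify_modify {α : Type} (l : List α) (i : Nat) (f g : α → α) :
    (l.modify i f).modify i g = l.modify i (fun x => g (f x)) := by
  apply List.ext_getElem
  · simp
  · intro j h1 h2
    simp only [List.getElem_modify]
    split <;> rfl

theorem pv_getD_modify_ne {α : Type} (l : List α) (i j : Nat) (f : α → α) (d : α)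
    (h : i ≠ j) : (l.modify i f).getD j d = l.getD j d := by
  simp [List.getD_eq_getElem?_getD, List.getElem?_modify, h]

theorem pv_modify_map_range {α : Type} (m i : Nat) (g : Nat → α) (f : α → α) (hi : i < m) :
    ((List.range m).map g).modify i f
      = (List.range m).map (fun j => if j = i then f (g i) else g j) := by
  apply List.ext_getElem
  · simp
  · intro j h1 h2
    simp only [List.length_map, List.length_range] at h1 h2
    simp only [List.getElem_modify, List.getElem_map, List.getElem_range]
    by_cases h : i = j
    · simp [h]
    · simp [h, Ne.symm h]

-- the copy loop 'for k in range(7): nex[i][k] = nex[i+1][k]' collapses to one row modify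
theorem pv_copy_fold (ks : List Nat) (nex : List (List Int)) (i : Nat) :
    ks.foldl (fun nx2 k =>
        nx2.modify i (fun row => row.set k ((nx2.getD (i + 1) []).getD k 0))) nex
      = nex.modify i (fun row =>
          ks.foldl (fun row k => row.set k ((nex.getD (i + 1) []).getD k 0)) row) := by
  induction ks generalizing nex with
  | nil => simp [pv_modify_id]
  | cons k ks ih =>
      simp only [List.foldl_cons]
      rw [ih, pv_getD_modify_ne _ _ _ _ _ (by omega), pv_modify_modify]

-- writing positions 0..m-1 of a row from r
theorem pv_setfrom (m : Nat) (r row : List Int) (hm : m ≤ row.length) (hm2 : m ≤ r.length) :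
    (List.range m).foldl (fun w k => w.set k (r.getD k 0)) row = r.take m ++ row.drop m := by
  induction m with
  | zero => simp
  | succ m ih =>
      rw [List.range_succ, List.foldl_append, ih (by omega) (by omega)]
      simp only [List.foldl_cons, List.foldl_nil]
      rw [List.set_append]
      rw [if_neg (by rw [List.length_take]; omega)]
      have hlt : m < row.length := by omega
      have hlr : m < r.length := by omega
      rw [List.length_take, List.drop_eq_getElem_cons hlt]
      have : m - min m r.length = 0 := by omega
      rw [this, List.set_cons_zero, List.getD_eq_getElem?_getD, List.getElem?_eq_getElem hlr]
      rw [show List.take (m + 1) r = List.take m r ++ [r[m]] from by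
        rw [List.take_succ, List.getElem?_eq_getElem hlr]; rfl]
      rw [List.append_assoc]
      rfl

-- A-side state after processing indices i..n-1
def pvStateA (L : List Char) (N : Int) (n i : Nat) : List (List Int) :=
  (List.range (n + 1)).map (fun j => if j < i then List.replicate 7 N else pvRow L N n j)

-- B-side: row j of the table once the first k columns are filled
def pvRowB (L : List Char) (N : Int) (n k j : Nat) : List Int :=
  (pvRow L N n j).take k ++ List.replicate (7 - k) N

def pvStateB (L : List Char) (N : Int) (n k i : Nat) : List (List Int) :=
  (List.range (n + 1)).map (fun j => if i ≤ j then pvRowB L N n (k + 1) j else pvRowB L N n k j)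

theorem pvRowB_zero (L : List Char) (N : Int) (n j : Nat) :
    pvRowB L N n 0 j = List.replicate 7 N := by simp [pvRowB]

theorem pvRowB_seven (L : List Char) (N : Int) (n j : Nat) :
    pvRowB L N n 7 j = pvRow L N n j := by
  simp [pvRowB, List.take_of_length_le (le_of_eq (pvRow_len L N n j))]

theorem pvRowB_set (L : List Char) (N : Int) (n k j : Nat) (hk : k < 7) :
    (pvRowB L N n k j).set k (pvT L N n (pvChars.getD k 'a') j) = pvRowB L N n (k + 1) j := by
  have hlen : (pvRow L N n j).length = 7 := pvRow_len L N n j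
  have htk : ((pvRow L N n j).take k).length = k := by simp [hlen]; omega
  unfold pvRowB
  rw [List.set_append, if_neg (by omega)]
  rw [htk, Nat.sub_self]
  have h7 : 7 - k = (6 - k) + 1 := by omega
  rw [h7, List.replicate_succ, List.set_cons_zero]
  rw [List.take_succ, List.getElem?_eq_getElem (by omega : k < (pvRow L N n j).length)]
  have : (pvRow L N n j)[k]'(by omega) = pvT L N n (pvChars.getD k 'a') j := by
    simp only [pvRow, List.getElem_map]
    congr 1
    have : k < pvChars.length := by simp [pvChars]; omega
    simp [List.getD_eq_getElem?_getD, List.getElem?_eq_getElem this]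
  rw [this]
  simp [h7]

theorem pv_row_set0 (L : List Char) (N : Int) (n i : Nat) (ci : Char)
    (Heq : pvT L N n ci i = (i : Int))
    (Hne : ∀ c, ci ≠ c → pvT L N n c i = pvT L N n c (i + 1)) (h : ci = 'a') :
    (pvRow L N n (i + 1)).set 0 (i : Int) = pvRow L N n i := by
  subst h
  simp only [pvRow, pvChars, List.map_cons, List.map_nil, List.set_cons_succ, List.set_cons_zero]
  rw [Hne 't' (by decide), Hne 'c' (by decide), Hne 'o' (by decide), Hne 'd' (by decide), Hne 'e' (by decide), Hne 'r' (by decide), Heq]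

theorem pv_row_set1 (L : List Char) (N : Int) (n i : Nat) (ci : Char)
    (Heq : pvT L N n ci i = (i : Int))
    (Hne : ∀ c, ci ≠ c → pvT L N n c i = pvT L N n c (i + 1)) (h : ci = 't') :
    (pvRow L N n (i + 1)).set 1 (i : Int) = pvRow L N n i := by
  subst h
  simp only [pvRow, pvChars, List.map_cons, List.map_nil, List.set_cons_succ, List.set_cons_zero]
  rw [Hne 'a' (by decide), Hne 'c' (by decide), Hne 'o' (by decide), Hne 'd' (by decide), Hne 'e' (by decide), Hne 'r' (by decide), Heq]

theorem pv_row_set2 (L : List Char) (N : Int) (n i : Nat) (ci : Char)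
    (Heq : pvT L N n ci i = (i : Int))
    (Hne : ∀ c, ci ≠ c → pvT L N n c i = pvT L N n c (i + 1)) (h : ci = 'c') :
    (pvRow L N n (i + 1)).set 2 (i : Int) = pvRow L N n i := by
  subst h
  simp only [pvRow, pvChars, List.map_cons, List.map_nil, List.set_cons_succ, List.set_cons_zero]
  rw [Hne 'a' (by decide), Hne 't' (by decide), Hne 'o' (by decide), Hne 'd' (by decide), Hne 'e' (by decide), Hne 'r' (by decide), Heq]

theorem pv_row_set3 (L : List Char) (N : Int) (n i : Nat) (ci : Char)
    (Heq : pvT L N n ci i = (i : Int))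
    (Hne : ∀ c, ci ≠ c → pvT L N n c i = pvT L N n c (i + 1)) (h : ci = 'o') :
    (pvRow L N n (i + 1)).set 3 (i : Int) = pvRow L N n i := by
  subst h
  simp only [pvRow, pvChars, List.map_cons, List.map_nil, List.set_cons_succ, List.set_cons_zero]
  rw [Hne 'a' (by decide), Hne 't' (by decide), Hne 'c' (by decide), Hne 'd' (by decide), Hne 'e' (by decide), Hne 'r' (by decide), Heq]

theorem pv_row_set4 (L : List Char) (N : Int) (n i : Nat) (ci : Char)
    (Heq : pvT L N n ci i = (i : Int))
    (Hne : ∀ c, ci ≠ c → pvT L N n c i = pvT L N n c (i + 1)) (h : ci = 'd') :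
    (pvRow L N n (i + 1)).set 4 (i : Int) = pvRow L N n i := by
  subst h
  simp only [pvRow, pvChars, List.map_cons, List.map_nil, List.set_cons_succ, List.set_cons_zero]
  rw [Hne 'a' (by decide), Hne 't' (by decide), Hne 'c' (by decide), Hne 'o' (by decide), Hne 'e' (by decide), Hne 'r' (by decide), Heq]

theorem pv_row_set5 (L : List Char) (N : Int) (n i : Nat) (ci : Char)
    (Heq : pvT L N n ci i = (i : Int))
    (Hne : ∀ c, ci ≠ c → pvT L N n c i = pvT L N n c (i + 1)) (h : ci = 'e') :
    (pvRow L N n (i + 1)).set 5 (i : Int) = pvRow L N n i := by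
  subst h
  simp only [pvRow, pvChars, List.map_cons, List.map_nil, List.set_cons_succ, List.set_cons_zero]
  rw [Hne 'a' (by decide), Hne 't' (by decide), Hne 'c' (by decide), Hne 'o' (by decide), Hne 'd' (by decide), Hne 'r' (by decide), Heq]

theorem pv_row_set6 (L : List Char) (N : Int) (n i : Nat) (ci : Char)
    (Heq : pvT L N n ci i = (i : Int))
    (Hne : ∀ c, ci ≠ c → pvT L N n c i = pvT L N n c (i + 1)) (h : ci = 'r') :
    (pvRow L N n (i + 1)).set 6 (i : Int) = pvRow L N n i := by
  subst h
  simp only [pvRow, pvChars, List.map_cons, List.map_nil, List.set_cons_succ, List.set_cons_zero]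
  rw [Hne 'a' (by decide), Hne 't' (by decide), Hne 'c' (by decide), Hne 'o' (by decide), Hne 'd' (by decide), Hne 'e' (by decide), Heq]

theorem pv_row_nomatch (L : List Char) (N : Int) (n i : Nat) (ci : Char)
    (Hne : ∀ c, ci ≠ c → pvT L N n c i = pvT L N n c (i + 1)) (h0 : ci ≠ 'a') (h1 : ci ≠ 't') (h2 : ci ≠ 'c') (h3 : ci ≠ 'o') (h4 : ci ≠ 'd') (h5 : ci ≠ 'e') (h6 : ci ≠ 'r') :
    pvRow L N n (i + 1) = pvRow L N n i := by
  simp only [pvRow, pvChars, List.map_cons, List.map_nil]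
  rw [Hne 'a' h0, Hne 't' h1, Hne 'c' h2, Hne 'o' h3, Hne 'd' h4, Hne 'e' h5, Hne 'r' h6]

theorem pv_enum_chars : PySem.List.enumerate pvChars
    = [(((0:Nat):Int),'a'),(((1:Nat):Int),'t'),(((2:Nat):Int),'c'),(((3:Nat):Int),'o'),
       (((4:Nat):Int),'d'),(((5:Nat):Int),'e'),(((6:Nat):Int),'r')] := by decide

theorem pv_stepA (S : String) (N : Int) (n i : Nat) (hn : n ≤ S.toList.length) (hi : i < n) :
    pvBodyA S (pvStateA S.toList N n (i + 1)) (i : Int) = pvStateA S.toList N n i := by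
  have hiL : i < S.toList.length := lt_of_lt_of_le hi hn
  have hS : PySem.Str.pyGet? S (i : Int) = some (S.toList[i]'hiL) := by
    simp [PySem.Str.pyGet?, List.getElem?_eq_getElem hiL]
  have Heq : pvT S.toList N n (S.toList[i]'hiL) i = (i : Int) :=
    pvT_eq _ _ _ _ _ hi (List.getElem?_eq_getElem hiL)
  have Hne : ∀ c : Char, S.toList[i]'hiL ≠ c → pvT S.toList N n c i = pvT S.toList N n c (i + 1) :=
    fun c hc => pvT_ne _ _ _ _ _ _ hi (List.getElem?_eq_getElem hiL) hc
  have hgd : (pvStateA S.toList N n (i + 1)).getD (i + 1) [] = pvRow S.toList N n (i + 1) := by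
    rw [pvStateA, PySem.List.getD_map_range _ (n + 1) (i + 1) _ (by omega)]
    simp
  simp only [pvBodyA, Int.toNat_natCast,
    show ((i : Int) + 1) = (((i + 1 : Nat)) : Int) by push_cast; ring,
    PySem.List.pyGetD_natCast]
  rw [pv_copy_fold]
  simp only [hgd]
  rw [show pvStateA S.toList N n (i + 1)
        = (List.range (n + 1)).map (fun j => if j < i + 1 then List.replicate 7 N else pvRow S.toList N n j) from rfl]
  rw [pv_modify_map_range _ _ _ _ (by omega : i < n + 1)]
  rw [if_pos (Nat.lt_succ_self i)]
  rw [pv_setfrom 7 _ _ (by simp) (by rw [pvRow_len])]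
  rw [List.take_of_length_le (le_of_eq (pvRow_len _ N n (i+1)))]
  rw [List.drop_eq_nil_of_le (by simp : (List.replicate 7 N).length ≤ 7), List.append_nil]
  rw [hS, pvChars_eq, pv_enum_chars]
  by_cases h0 : S.toList[i]'hiL = 'a'
  · simp only [pvMatchLoop, Option.some.injEq]
    rw [if_pos h0]
    simp only [Int.toNat_natCast]
    rw [pv_modify_map_range _ _ _ _ (by omega : i < n + 1)]
    rw [pvStateA]
    apply List.map_congr_left
    intro j hj
    simp only [List.mem_range] at hj
    by_cases hji : j = i
    · subst hji
      simp only [if_pos rfl, if_neg (lt_irrefl j)]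
      exact pv_row_set0 _ _ _ _ _ Heq Hne h0
    · simp only [if_neg hji, show (j < i + 1) ↔ (j < i) from by omega]
  by_cases h1 : S.toList[i]'hiL = 't'
  · simp only [pvMatchLoop, Option.some.injEq]
    rw [if_neg h0, if_pos h1]
    simp only [Int.toNat_natCast]
    rw [pv_modify_map_range _ _ _ _ (by omega : i < n + 1)]
    rw [pvStateA]
    apply List.map_congr_left
    intro j hj
    simp only [List.mem_range] at hj
    by_cases hji : j = i
    · subst hji
      simp only [if_pos rfl, if_neg (lt_irrefl j)]
      exact pv_row_set1 _ _ _ _ _ Heq Hne h1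
    · simp only [if_neg hji, show (j < i + 1) ↔ (j < i) from by omega]
  by_cases h2 : S.toList[i]'hiL = 'c'
  · simp only [pvMatchLoop, Option.some.injEq]
    rw [if_neg h0, if_neg h1, if_pos h2]
    simp only [Int.toNat_natCast]
    rw [pv_modify_map_range _ _ _ _ (by omega : i < n + 1)]
    rw [pvStateA]
    apply List.map_congr_left
    intro j hj
    simp only [List.mem_range] at hj
    by_cases hji : j = i
    · subst hji
      simp only [if_pos rfl, if_neg (lt_irrefl j)]
      exact pv_row_set2 _ _ _ _ _ Heq Hne h2
    · simp only [if_neg hji, show (j < i + 1) ↔ (j < i) from by omega]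
  by_cases h3 : S.toList[i]'hiL = 'o'
  · simp only [pvMatchLoop, Option.some.injEq]
    rw [if_neg h0, if_neg h1, if_neg h2, if_pos h3]
    simp only [Int.toNat_natCast]
    rw [pv_modify_map_range _ _ _ _ (by omega : i < n + 1)]
    rw [pvStateA]
    apply List.map_congr_left
    intro j hj
    simp only [List.mem_range] at hj
    by_cases hji : j = i
    · subst hji
      simp only [if_pos rfl, if_neg (lt_irrefl j)]
      exact pv_row_set3 _ _ _ _ _ Heq Hne h3
    · simp only [if_neg hji, show (j < i + 1) ↔ (j < i) from by omega]
  by_cases h4 : S.toList[i]'hiL = 'd'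
  · simp only [pvMatchLoop, Option.some.injEq]
    rw [if_neg h0, if_neg h1, if_neg h2, if_neg h3, if_pos h4]
    simp only [Int.toNat_natCast]
    rw [pv_modify_map_range _ _ _ _ (by omega : i < n + 1)]
    rw [pvStateA]
    apply List.map_congr_left
    intro j hj
    simp only [List.mem_range] at hj
    by_cases hji : j = i
    · subst hji
      simp only [if_pos rfl, if_neg (lt_irrefl j)]
      exact pv_row_set4 _ _ _ _ _ Heq Hne h4
    · simp only [if_neg hji, show (j < i + 1) ↔ (j < i) from by omega]
  by_cases h5 : S.toList[i]'hiL = 'e'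
  · simp only [pvMatchLoop, Option.some.injEq]
    rw [if_neg h0, if_neg h1, if_neg h2, if_neg h3, if_neg h4, if_pos h5]
    simp only [Int.toNat_natCast]
    rw [pv_modify_map_range _ _ _ _ (by omega : i < n + 1)]
    rw [pvStateA]
    apply List.map_congr_left
    intro j hj
    simp only [List.mem_range] at hj
    by_cases hji : j = i
    · subst hji
      simp only [if_pos rfl, if_neg (lt_irrefl j)]
      exact pv_row_set5 _ _ _ _ _ Heq Hne h5
    · simp only [if_neg hji, show (j < i + 1) ↔ (j < i) from by omega]
  by_cases h6 : S.toList[i]'hiL = 'r'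
  · simp only [pvMatchLoop, Option.some.injEq]
    rw [if_neg h0, if_neg h1, if_neg h2, if_neg h3, if_neg h4, if_neg h5, if_pos h6]
    simp only [Int.toNat_natCast]
    rw [pv_modify_map_range _ _ _ _ (by omega : i < n + 1)]
    rw [pvStateA]
    apply List.map_congr_left
    intro j hj
    simp only [List.mem_range] at hj
    by_cases hji : j = i
    · subst hji
      simp only [if_pos rfl, if_neg (lt_irrefl j)]
      exact pv_row_set6 _ _ _ _ _ Heq Hne h6
    · simp only [if_neg hji, show (j < i + 1) ↔ (j < i) from by omega]
  · simp only [pvMatchLoop, Option.some.injEq]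
    rw [if_neg h0, if_neg h1, if_neg h2, if_neg h3, if_neg h4, if_neg h5, if_neg h6]
    rw [pvStateA]
    apply List.map_congr_left
    intro j hj
    simp only [List.mem_range] at hj
    by_cases hji : j = i
    · subst hji
      simp only [if_pos rfl, if_neg (lt_irrefl j)]
      exact pv_row_nomatch _ _ _ _ _ Hne h0 h1 h2 h3 h4 h5 h6
    · simp only [if_neg hji, show (j < i + 1) ↔ (j < i) from by omega]

theorem pv_foldA (S : String) (N : Int) (n : Nat) (hn : n ≤ S.toList.length) :
    ∀ i, i ≤ n →
      (PySem.List.pyRange ((i : Int) - 1) (-1) (-1)).foldl (pvBodyA S) (pvStateA S.toList N n i)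
        = pvStateA S.toList N n 0 := by
  intro i
  induction i with
  | zero =>
      intro _
      rw [show ((0:Nat):Int) - 1 = -1 by norm_num, PySem.List.pyRange_neg_one_eq_nil (le_refl _)]
      rfl
  | succ i ih =>
      intro h
      rw [show (((i+1:Nat)):Int) - 1 = (i:Int) by push_cast; ring]
      rw [PySem.List.pyRange_neg_one_cons (by omega : (-1:Int) < (i:Int))]
      rw [List.foldl_cons, pv_stepA S N n i hn (by omega)]
      exact ih (by omega)

theorem pvRowB_top (L : List Char) (N : Int) (n k : Nat) (hk : k ≤ 7) :
    pvRowB L N n k n = List.replicate 7 N := by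
  rw [pvRowB, pvRow_top, List.take_replicate, ← List.replicate_add]
  congr 1
  omega

theorem pv_stepB_lemma (S : String) (N : Int) (n k i : Nat) (ki : Int) (c : Char) (hk : k < 7)
    (hki : ki.toNat = k) (hc : pvChars.getD k 'a' = c) (hn : n ≤ S.toList.length) (hi : i < n) :
    pvStepB S (ki, c) (pvStateB S.toList N n k (i + 1), pvT S.toList N n c (i + 1)) (i : Int)
      = (pvStateB S.toList N n k i, pvT S.toList N n c i) := by
  have hiL : i < S.toList.length := lt_of_lt_of_le hi hn
  have hS : PySem.Str.pyGet? S (i : Int) = some (S.toList[i]'hiL) := by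
    simp [PySem.Str.pyGet?, List.getElem?_eq_getElem hiL]
  have hnxt : (if PySem.Str.pyGet? S (i:Int) = some c then (i:Int) else pvT S.toList N n c (i+1))
      = pvT S.toList N n c i := by
    rw [hS]
    by_cases hce : S.toList[i]'hiL = c
    · rw [if_pos (by rw [hce]), pvT_eq _ _ _ _ _ hi (by rw [List.getElem?_eq_getElem hiL, hce])]
    · rw [if_neg (by simp [hce]), pvT_ne _ _ _ _ _ _ hi (List.getElem?_eq_getElem hiL) hce]
  simp only [pvStepB, Int.toNat_natCast, hki]
  rw [hnxt]
  rw [Prod.mk.injEq]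
  refine ⟨?_, rfl⟩
  rw [show pvStateB S.toList N n k (i + 1)
      = (List.range (n + 1)).map (fun j => if i + 1 ≤ j then pvRowB S.toList N n (k+1) j else pvRowB S.toList N n k j) from rfl]
  rw [pv_modify_map_range _ _ _ _ (by omega : i < n + 1)]
  rw [pvStateB]
  apply List.map_congr_left
  intro j hj
  simp only [List.mem_range] at hj
  by_cases hji : j = i
  · subst hji
    simp only [if_pos rfl, if_neg (by omega : ¬ (j + 1 ≤ j)), le_refl, if_true]
    rw [← hc, pvRowB_set _ _ _ _ _ hk]
  · simp only [if_neg hji, show (i + 1 ≤ j) ↔ (i ≤ j) from by omega]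

theorem pv_colB_fold (S : String) (N : Int) (n : Nat) (hn : n ≤ S.toList.length) (k : Nat)
    (ki : Int) (c : Char) (hk : k < 7) (hki : ki.toNat = k) (hc : pvChars.getD k 'a' = c) :
    ∀ i, i ≤ n →
      (PySem.List.pyRange ((i : Int) - 1) (-1) (-1)).foldl (pvStepB S (ki, c))
          (pvStateB S.toList N n k i, pvT S.toList N n c i)
        = (pvStateB S.toList N n k 0, pvT S.toList N n c 0) := by
  intro i
  induction i with
  | zero =>
      intro _
      rw [show ((0:Nat):Int) - 1 = -1 by norm_num, PySem.List.pyRange_neg_one_eq_nil (le_refl _)]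
      rfl
  | succ i ih =>
      intro h
      rw [show (((i+1:Nat)):Int) - 1 = (i:Int) by push_cast; ring]
      rw [PySem.List.pyRange_neg_one_cons (by omega : (-1:Int) < (i:Int))]
      rw [List.foldl_cons, pv_stepB_lemma S N n k i ki c hk hki hc hn (by omega)]
      exact ih (by omega)

theorem pv_colB_start (S : String) (n : Nat) (hn : n ≤ S.toList.length) (k : Nat)
    (ki : Int) (c : Char) (hk : k < 7) (hki : ki.toNat = k) (hc : pvChars.getD k 'a' = c) :
    pvColB S (n : Int) ((List.range (n + 1)).map (pvRowB S.toList (n : Int) n k)) (ki, c)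
      = (List.range (n + 1)).map (pvRowB S.toList (n : Int) n (k + 1)) := by
  unfold pvColB
  have h1 : ((List.range (n + 1)).map (pvRowB S.toList ((n:Nat):Int) n k), ((n:Nat):Int))
      = (pvStateB S.toList ((n:Nat):Int) n k n, pvT S.toList ((n:Nat):Int) n c n) := by
    rw [pvT_top, Prod.mk.injEq]
    refine ⟨?_, rfl⟩
    rw [pvStateB]
    apply List.map_congr_left
    intro j hj
    simp only [List.mem_range] at hj
    by_cases hjn : n ≤ j
    · have hj' : j = n := by omega
      subst hj'
      rw [if_pos (le_refl j), pvRowB_top _ _ _ _ (by omega), pvRowB_top _ _ _ _ (by omega)]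
    · rw [if_neg hjn]
  rw [show ((n:Int) - 1) = (((n:Nat)):Int) - 1 from rfl]
  rw [h1, pv_colB_fold S ((n:Nat):Int) n hn k ki c hk hki hc n (le_refl n)]
  rw [pvStateB]
  apply List.map_congr_left
  intro j hj
  rw [if_pos (Nat.zero_le j)]

theorem pv_nex0A (S : String) (n : Nat) :
    (PySem.List.pyRange 0 ((n : Int) + 1) 1).map (fun _ => List.replicate 7 ((n:Int)))
      = pvStateA S.toList (n:Int) n n := by
  rw [PySem.List.pyRange_one, List.map_map]
  rw [show ((n:Int) + 1 - 0).toNat = n + 1 by omega]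
  rw [pvStateA]
  apply List.map_congr_left
  intro j hj
  simp only [List.mem_range] at hj
  by_cases hjn : j < n
  · rw [Function.comp_apply, if_pos hjn]
  · have hj' : j = n := by omega
    subst hj'
    rw [Function.comp_apply, if_neg (lt_irrefl j), pvRow_top]

theorem pv_nex0B (S : String) (n : Nat) :
    (PySem.List.pyRange 0 ((n : Int) + 1) 1).map (fun _ => List.replicate 7 ((n:Int)))
      = (List.range (n + 1)).map (pvRowB S.toList (n:Int) n 0) := by
  rw [PySem.List.pyRange_one, List.map_map]
  rw [show ((n:Int) + 1 - 0).toNat = n + 1 by omega]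
  apply List.map_congr_left
  intro j hj
  rw [Function.comp_apply, pvRowB_zero]

theorem pv_finalA (S : String) (n : Nat) :
    pvStateA S.toList (n:Int) n 0 = (List.range (n + 1)).map (pvRowB S.toList (n:Int) n 7) := by
  rw [pvStateA]
  apply List.map_congr_left
  intro j hj
  rw [if_neg (by omega), pvRowB_seven]

-- ===== VERDICT (by name: the statement is the Claim_ definition above) =====
theorem create_next_spec : Claim_equal_create_next := by
  intro N S _hdom hpre
  unfold Spec_create_next
  by_cases hneg : N < 0
  · have h1 : PySem.List.pyRange 0 (N + 1) 1 = [] := PySem.List.pyRange_one_eq_nil (by omega)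
    have h2 : PySem.List.pyRange (N - 1) (-1) (-1) = [] := PySem.List.pyRange_neg_one_eq_nil (by omega)
    rw [pvA_eq, pvB_eq, h1, h2, pvChars_eq, pv_enum_chars]
    simp [pvColB, h2]
  · push_neg at hneg
    lift N to ℕ using hneg with n
    have hn : n ≤ S.toList.length := by
      have h := hpre
      unfold Pre_create_next at h
      exact_mod_cast h
    rw [pvA_eq, pvB_eq, pvChars_eq, pv_enum_chars]
    conv_rhs => rw [pv_nex0B S n]
    simp only [List.foldl_cons, List.foldl_nil]
    rw [pv_colB_start S n hn 0 (((0:Nat):Int)) 'a' (by omega) (by simp) (by decide)]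
    rw [pv_colB_start S n hn 1 (((1:Nat):Int)) 't' (by omega) (by simp) (by decide)]
    rw [pv_colB_start S n hn 2 (((2:Nat):Int)) 'c' (by omega) (by simp) (by decide)]
    rw [pv_colB_start S n hn 3 (((3:Nat):Int)) 'o' (by omega) (by simp) (by decide)]
    rw [pv_colB_start S n hn 4 (((4:Nat):Int)) 'd' (by omega) (by simp) (by decide)]
    rw [pv_colB_start S n hn 5 (((5:Nat):Int)) 'e' (by omega) (by simp) (by decide)]
    rw [pv_colB_start S n hn 6 (((6:Nat):Int)) 'r' (by omega) (by simp) (by decide)]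
    rw [pv_nex0A S n, pv_foldA S ((n:Nat):Int) n hn n (le_refl n), pv_finalA]
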